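-- pv_equiv track=rewrite | github.com/ShyamKumar1208/phishing-detector | app.py | normalize_domain_text
-- ===== SOURCE A (Python) =====
-- def normalize_domain_text(domain):
--     domain = domain.lower().replace("www.", "")
--
--     replacements = {
--         '0': 'o',
--         '1': 'l',
--         '3': 'e',
--         '5': 's',
--         '7': 't',
--         '@': 'a'
--     }
--
--     for k, v in replacements.items():
--         domain = domain.replace(k, v)
--
--     return domain
-- ===== SOURCE B (Python) =====
-- def normalize_domain_text(domain):
--     domain = domain.lower().replace("www.", "")
--
--     mapping = {
--         '0': 'o',
--         '1': 'l',
--         '3': 'e',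
--         '5': 's',
--         '7': 't',
--         '@': 'a'
--     }
--
--     return ''.join(mapping.get(c, c) for c in domain)
-- ===== Notes on version B (the rewrite author's own statement) =====
-- stated objective: idiomatic
-- what changed: Replaces A's six sequential whole-string str.replace scans (one pass per substitution pair) with a single pass over the characters using a dict lookup per character; safe because the source chars (digits, '@') and target chars (letters) are disjoint so the sequential replaces never cascade.
import Mathlib
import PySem

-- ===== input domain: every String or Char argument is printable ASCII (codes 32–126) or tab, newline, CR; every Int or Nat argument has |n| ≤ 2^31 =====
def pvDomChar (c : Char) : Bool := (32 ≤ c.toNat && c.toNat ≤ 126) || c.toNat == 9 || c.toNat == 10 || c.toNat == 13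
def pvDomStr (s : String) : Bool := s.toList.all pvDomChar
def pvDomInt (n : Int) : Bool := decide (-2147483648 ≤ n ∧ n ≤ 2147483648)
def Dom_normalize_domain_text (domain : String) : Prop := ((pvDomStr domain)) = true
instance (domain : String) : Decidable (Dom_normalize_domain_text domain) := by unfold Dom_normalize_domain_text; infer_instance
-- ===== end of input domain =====

-- B replaces A's six sequential whole-string replace scans by one pass over the characters with a dict lookup (idiomatic single traversal).


-- ===== PORT A =====
-- replacements dict, in A's insertion order
def pvReplacementsA : PySem.Dict String String :=
  PySem.Dict.ofList [("0", "o"), ("1", "l"), ("3", "e"), ("5", "s"), ("7", "t"), ("@", "a")]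

def normalize_domain_text (domain : String) : String :=
  let domain := PySem.Str.replace (PySem.Str.lower domain) "www." ""
  -- for k, v in replacements.items(): domain = domain.replace(k, v)
  pvReplacementsA.items.foldl (fun d kv => PySem.Str.replace d kv.1 kv.2) domain

-- ===== PORT B =====
-- mapping dict, keyed per character
def pvMappingB : PySem.Dict Char Char :=
  PySem.Dict.ofList [('0', 'o'), ('1', 'l'), ('3', 'e'), ('5', 's'), ('7', 't'), ('@', 'a')]

def normalize_domain_text_alt (domain : String) : String :=
  let domain := PySem.Str.replace (PySem.Str.lower domain) "www." ""
  -- ''.join(mapping.get(c, c) for c in domain)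
  String.ofList (domain.toList.map (fun c => pvMappingB.getD c c))

-- ===== PRECONDITION & SPEC =====
def Spec_normalize_domain_text (domain : String) (out : String) : Prop := out = normalize_domain_text_alt domain
instance (domain : String) (out : String) : Decidable (Spec_normalize_domain_text domain out) := by unfold Spec_normalize_domain_text; infer_instance

-- ===== CLAIM (what is proved, stated in full; the proofs are below) =====
def Claim_equal_normalize_domain_text : Prop := ∀ (domain : String), Dom_normalize_domain_text domain → Spec_normalize_domain_text domain (normalize_domain_text domain)

-- ===== LEMMAS AND PROOFS =====

-- replacing the single char k by the single char v is a character map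
theorem pvGo_single (k v : Char) : ∀ (l : List Char) (fuel : Nat) (acc : List Char), l.length ≤ fuel →
    PySem.Chars.replace.go [k] [v] fuel l acc = acc.reverse ++ l.map (fun c => if c = k then v else c) := by
  intro l
  induction l with
  | nil =>
    intro fuel acc _
    cases fuel <;> simp [PySem.Chars.replace.go]
  | cons c t ih =>
    intro fuel acc hle
    cases fuel with
    | zero => simp at hle
    | succ n =>
      simp only [PySem.Chars.replace.go, List.isPrefixOf, List.map_cons]
      by_cases hc : c = k
      · simp only [hc, beq_self_eq_true, Bool.true_and, if_pos,
          List.length_cons, List.length_nil, List.drop_succ_cons, List.drop_zero]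
        rw [ih n ([v].reverse ++ acc) (by simpa using Nat.le_of_succ_le_succ hle)]
        simp
      · rw [if_neg (by simp; exact Ne.symm hc)]
        rw [ih n (c :: acc) (Nat.le_of_succ_le_succ hle)]
        simp [hc]

theorem pvReplace_single (k v : Char) (l : List Char) :
    PySem.Chars.replace l [k] [v] = l.map (fun c => if c = k then v else c) := by
  simp only [PySem.Chars.replace, List.isEmpty]
  rw [if_neg (by simp)]
  simpa using pvGo_single k v l l.length [] le_rfl

-- pointwise substitution for one pair
def pvSub (k v c : Char) : Char := if c = k then v else c

-- the six sequential single-char substitutions agree pointwise with one dict lookup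
theorem pvChain_eq (c : Char) :
    pvSub '@' 'a' (pvSub '7' 't' (pvSub '5' 's' (pvSub '3' 'e' (pvSub '1' 'l' (pvSub '0' 'o' c))))) =
      pvMappingB.getD c c := by
  by_cases h0 : c = '0'
  · subst h0; decide
  by_cases h1 : c = '1'
  · subst h1; decide
  by_cases h3 : c = '3'
  · subst h3; decide
  by_cases h5 : c = '5'
  · subst h5; decide
  by_cases h7 : c = '7'
  · subst h7; decide
  by_cases ha : c = '@'
  · subst ha; decide
  · have e0 : ('0' == c) = false := by simp; exact Ne.symm h0
    have e1 : ('1' == c) = false := by simp; exact Ne.symm h1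
    have e3 : ('3' == c) = false := by simp; exact Ne.symm h3
    have e5 : ('5' == c) = false := by simp; exact Ne.symm h5
    have e7 : ('7' == c) = false := by simp; exact Ne.symm h7
    have ea : ('@' == c) = false := by simp; exact Ne.symm ha
    simp [pvSub, h0, h1, h3, h5, h7, ha, e0, e1, e3, e5, e7, ea, pvMappingB, PySem.Dict.getD,
      PySem.Dict.get?, PySem.Dict.ofList, PySem.Dict.empty, PySem.Dict.update, PySem.Dict.insert,
      List.find?]

-- ===== VERDICT (by name: the statement is the Claim_ definition above) =====
set_option maxHeartbeats 1000000 in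
theorem normalize_domain_text_spec : Claim_equal_normalize_domain_text := by
  intro domain _
  unfold Spec_normalize_domain_text normalize_domain_text normalize_domain_text_alt
  set d := PySem.Str.replace (PySem.Str.lower domain) "www." "" with hd
  have hitems : pvReplacementsA.items =
      [("0", "o"), ("1", "l"), ("3", "e"), ("5", "s"), ("7", "t"), ("@", "a")] := by decide
  rw [hitems]
  simp only [List.foldl]
  have htl : ∀ (s : String) (k v : Char),
      (PySem.Str.replace s (String.ofList [k]) (String.ofList [v])).toList =
        s.toList.map (pvSub k v) := by
    intro s k v
    rw [PySem.Str.toList_replace]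
    simp only [String.toList_ofList]
    exact pvReplace_single k v s.toList
  apply String.toList_injective
  have h0 : ("0" : String) = String.ofList ['0'] := by decide
  have h1 : ("1" : String) = String.ofList ['1'] := by decide
  have h3 : ("3" : String) = String.ofList ['3'] := by decide
  have h5 : ("5" : String) = String.ofList ['5'] := by decide
  have h7 : ("7" : String) = String.ofList ['7'] := by decide
  have ha : ("@" : String) = String.ofList ['@'] := by decide
  have ho : ("o" : String) = String.ofList ['o'] := by decide
  have hl : ("l" : String) = String.ofList ['l'] := by decide
  have he : ("e" : String) = String.ofList ['e'] := by decide
  have hs : ("s" : String) = String.ofList ['s'] := by decide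
  have ht : ("t" : String) = String.ofList ['t'] := by decide
  have haa : ("a" : String) = String.ofList ['a'] := by decide
  rw [h0, h1, h3, h5, h7, ha, ho, hl, he, hs, ht, haa]
  rw [htl, htl, htl, htl, htl, htl]
  simp only [List.map_map, String.toList_ofList]
  apply List.map_congr_left
  intro c _
  simp only [Function.comp]
  exact pvChain_eq c
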